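-- pv_equiv track=rewrite | github.com/rajeshgangireddy/geti-instant-learn | library/src/instantlearn/models/efficient_sam3/model.py | _rename_repvit_suffix
-- ===== SOURCE A (Python) =====
-- def _rename_repvit_suffix(
--     suffix: str,
--     block_mapping: list[tuple[int, str, bool]],
-- ) -> str:
--     """Rename a single RepViT key suffix from original to timm format.
--
--     Args:
--         suffix: Key suffix after removing the backbone prefix.
--         block_mapping: Flat→hierarchical mapping from _build_repvit_block_mapping.
--
--     Returns:
--         Renamed suffix matching timm's naming convention.
--     """
--     # Stem: features.0.{0,2} → stem.{conv1,conv2}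
--     if suffix.startswith("features.0.0."):
--         return "stem.conv1." + suffix[len("features.0.0.") :]
--     if suffix.startswith("features.0.2."):
--         return "stem.conv2." + suffix[len("features.0.2.") :]
--
--     # Find matching block by flat index
--     for flat_idx, timm_prefix, is_stride2 in block_mapping:
--         feat_prefix = f"features.{flat_idx}."
--         if not suffix.startswith(feat_prefix):
--             continue
--
--         remainder = suffix[len(feat_prefix) :]
--         if is_stride2:
--             return _rename_repvit_stride2_block(timm_prefix, remainder)
--         return _rename_repvit_regular_block(timm_prefix, remainder)
--
--     return suffix  # Pass through unmatched keys
--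
-- def _rename_repvit_regular_block(prefix: str, remainder: str) -> str:
--     """Rename internals of a regular RepViT block.
--
--     Original Sequential-wrapped token_mixer and Residual-wrapped channel_mixer
--     are flattened to direct attributes in timm.
--
--     Mappings:
--     - ``token_mixer.0.X`` → ``token_mixer.X`` (strip Sequential index)
--     - ``token_mixer.1.X`` → ``se.X`` (SqueezeExcite moved to block level)
--     - ``channel_mixer.m.0.X`` → ``channel_mixer.conv1.X``
--     - ``channel_mixer.m.2.X`` → ``channel_mixer.conv2.X`` (index 1 is GELU)
--     """
--     rules: list[tuple[str, str]] = [
--         ("token_mixer.0.", "token_mixer."),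
--         ("token_mixer.1.", "se."),
--         ("channel_mixer.m.0.", "channel_mixer.conv1."),
--         ("channel_mixer.m.2.", "channel_mixer.conv2."),
--     ]
--     for old, new in rules:
--         if remainder.startswith(old):
--             return f"{prefix}.{new}{remainder[len(old) :]}"
--     return f"{prefix}.{remainder}"
--
-- def _rename_repvit_stride2_block(prefix: str, remainder: str) -> str:
--     """Rename internals of a stride-2 RepViT block into downsample components.
--
--     The original stride-2 RepViTBlock is split into separate downsample
--     sub-modules in timm:
--
--     Mappings:
--     - ``token_mixer.0.X`` → ``spatial_downsample.X`` (depthwise stride-2 conv)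
--     - ``token_mixer.2.X`` → ``channel_downsample.X`` (1x1 channel projection)
--     - ``channel_mixer.m.0.X`` → ``ffn.conv1.X``
--     - ``channel_mixer.m.2.X`` → ``ffn.conv2.X``
--     """
--     rules: list[tuple[str, str]] = [
--         ("token_mixer.0.", "spatial_downsample."),
--         ("token_mixer.2.", "channel_downsample."),
--         ("channel_mixer.m.0.", "ffn.conv1."),
--         ("channel_mixer.m.2.", "ffn.conv2."),
--     ]
--     for old, new in rules:
--         if remainder.startswith(old):
--             return f"{prefix}.{new}{remainder[len(old) :]}"
--     return f"{prefix}.{remainder}"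
-- ===== SOURCE B (Python) =====
-- def _rename_repvit_suffix(suffix, block_mapping):
--     """Parse-then-lookup rewrite: a first-wins dict keyed by the printed flat index
--     replaces A's linear scan over block_mapping, and the block internals are
--     renamed by splitting the remainder at its '.' separators instead of scanning
--     prefix-rule tables."""
--     if suffix.startswith("features.0.0."):
--         return "stem.conv1." + suffix[len("features.0.0."):]
--     if suffix.startswith("features.0.2."):
--         return "stem.conv2." + suffix[len("features.0.2."):]
--     if not suffix.startswith("features."):
--         return suffix
--
--     index = {}
--     for flat_idx, timm_prefix, is_stride2 in block_mapping:
--         index.setdefault(str(flat_idx), (timm_prefix, is_stride2))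
--
--     tok, sep, remainder = suffix[len("features."):].partition(".")
--     if not sep or tok not in index:
--         return suffix
--     prefix, stride2 = index[tok]
--
--     head, sep2, tail = remainder.partition(".")
--     if sep2 and head == "token_mixer":
--         names = {"0": "spatial_downsample", "2": "channel_downsample"} if stride2 \
--             else {"0": "token_mixer", "1": "se"}
--         sub, sep3, body = tail.partition(".")
--         if sep3 and sub in names:
--             return f"{prefix}.{names[sub]}.{body}"
--     elif sep2 and head == "channel_mixer" and tail.startswith("m."):
--         names = {"0": "ffn.conv1", "2": "ffn.conv2"} if stride2 \
--             else {"0": "channel_mixer.conv1", "2": "channel_mixer.conv2"}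
--         sub, sep3, body = tail[len("m."):].partition(".")
--         if sep3 and sub in names:
--             return f"{prefix}.{names[sub]}.{body}"
--     return f"{prefix}.{remainder}"
-- ===== Notes on version B (the rewrite author's own statement) =====
-- stated objective: alternative
-- what changed: A scans block_mapping linearly testing suffix.startswith(f'features.{i}.') per entry and then scans prefix-rule tables; B builds a first-wins dict keyed by str(flat_idx) once, parses the suffix at its '.' separators (partition) to extract the block token and the inner segments, and renames by dict lookups on the parsed segments.
import Mathlib
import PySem

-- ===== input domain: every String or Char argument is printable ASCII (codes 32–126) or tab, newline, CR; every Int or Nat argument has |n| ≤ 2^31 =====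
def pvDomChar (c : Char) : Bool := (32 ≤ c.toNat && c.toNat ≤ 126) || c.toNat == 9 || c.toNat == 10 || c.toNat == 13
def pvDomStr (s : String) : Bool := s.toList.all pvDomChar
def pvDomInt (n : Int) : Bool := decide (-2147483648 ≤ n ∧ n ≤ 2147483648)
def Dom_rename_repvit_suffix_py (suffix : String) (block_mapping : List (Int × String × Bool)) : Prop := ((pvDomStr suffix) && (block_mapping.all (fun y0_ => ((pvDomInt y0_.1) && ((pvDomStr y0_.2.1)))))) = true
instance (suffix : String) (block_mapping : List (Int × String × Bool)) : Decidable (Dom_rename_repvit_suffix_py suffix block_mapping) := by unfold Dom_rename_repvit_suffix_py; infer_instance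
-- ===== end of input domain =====

-- B replaces A's linear scan over block_mapping by a first-wins dict keyed by the printed
-- flat index plus a parse of the suffix at its '.' separators (objective: alternative).

-- ===== PORT A =====
-- the two rule tables of A's helpers, as (old, new) pairs
def pvRegularRules : List (List Char × List Char) :=
  [("token_mixer.0.".toList, "token_mixer.".toList),
   ("token_mixer.1.".toList, "se.".toList),
   ("channel_mixer.m.0.".toList, "channel_mixer.conv1.".toList),
   ("channel_mixer.m.2.".toList, "channel_mixer.conv2.".toList)]

def pvStride2Rules : List (List Char × List Char) :=
  [("token_mixer.0.".toList, "spatial_downsample.".toList),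
   ("token_mixer.2.".toList, "channel_downsample.".toList),
   ("channel_mixer.m.0.".toList, "ffn.conv1.".toList),
   ("channel_mixer.m.2.".toList, "ffn.conv2.".toList)]

-- 'for old, new in rules: if remainder.startswith(old): return …'; remainder[len(old):] is drop (len(old) ≥ 0)
def pvApplyRules (pfx : List Char) (rules : List (List Char × List Char)) (rem : List Char) : List Char :=
  match rules with
  | [] => pfx ++ '.' :: rem
  | (old, nw) :: rest =>
    if PySem.Chars.startswith rem old then pfx ++ '.' :: (nw ++ rem.drop old.length)
    else pvApplyRules pfx rest rem

-- 'for flat_idx, timm_prefix, is_stride2 in block_mapping: …' (feat_prefix = f"features.{flat_idx}.")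
def pvALoop (cs : List Char) (bm : List (Int × String × Bool)) : List Char :=
  match bm with
  | [] => cs
  | (flat_idx, timm_prefix, is_stride2) :: rest =>
    if PySem.Chars.startswith cs ("features.".toList ++ PySem.Int.toChars flat_idx ++ ['.']) then
      if is_stride2 then
        pvApplyRules timm_prefix.toList pvStride2Rules
          (cs.drop ("features.".toList ++ PySem.Int.toChars flat_idx ++ ['.']).length)
      else
        pvApplyRules timm_prefix.toList pvRegularRules
          (cs.drop ("features.".toList ++ PySem.Int.toChars flat_idx ++ ['.']).length)
    else pvALoop cs rest

def rename_repvit_suffix_py (suffix : String) (block_mapping : List (Int × String × Bool)) : String :=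
  if PySem.Chars.startswith suffix.toList "features.0.0.".toList then
    String.ofList ("stem.conv1.".toList ++ suffix.toList.drop "features.0.0.".toList.length)
  else if PySem.Chars.startswith suffix.toList "features.0.2.".toList then
    String.ofList ("stem.conv2.".toList ++ suffix.toList.drop "features.0.2.".toList.length)
  else String.ofList (pvALoop suffix.toList block_mapping)

-- ===== PORT B =====
-- Python str.partition('.') ported by hand (exact for the one-char separator '.'):
-- head = run of non-'.' chars; if a '.' follows it is the separator, the rest is the tail.
def pvPartitionDot (u : List Char) : List Char × Bool × List Char :=
  let head := u.takeWhile (fun c => c != '.')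
  if head.length < u.length then (head, true, u.drop (head.length + 1)) else (head, false, [])

-- 'index.setdefault(str(flat_idx), (timm_prefix, is_stride2))' over block_mapping
def pvIndex (bm : List (Int × String × Bool)) : PySem.Dict (List Char) (String × Bool) :=
  bm.foldl (fun d e => d.setdefault (PySem.Int.toChars e.1) (e.2.1, e.2.2)) PySem.Dict.empty

-- the four 'names' dict literals of Source B; a literal dict lookup is the if-chain it denotes
def pvTokName (stride2 : Bool) (sub : List Char) : Option (List Char) :=
  if stride2 then
    if sub = "0".toList then some "spatial_downsample".toList
    else if sub = "2".toList then some "channel_downsample".toList else none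
  else
    if sub = "0".toList then some "token_mixer".toList
    else if sub = "1".toList then some "se".toList else none

def pvChanName (stride2 : Bool) (sub : List Char) : Option (List Char) :=
  if stride2 then
    if sub = "0".toList then some "ffn.conv1".toList
    else if sub = "2".toList then some "ffn.conv2".toList else none
  else
    if sub = "0".toList then some "channel_mixer.conv1".toList
    else if sub = "2".toList then some "channel_mixer.conv2".toList else none

-- the body of Source B after the index lookup: parse the remainder at '.' and rebuild
def pvRenameBlock (timm_prefix : String) (stride2 : Bool) (remainder : List Char) : List Char :=
  match pvPartitionDot remainder with
  | (head, sep2, tail) =>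
    if sep2 && (head == "token_mixer".toList) then
      match pvPartitionDot tail with
      | (sub, sep3, body) =>
        match (if sep3 then pvTokName stride2 sub else none) with
        | some nm => timm_prefix.toList ++ '.' :: (nm ++ '.' :: body)
        | none => timm_prefix.toList ++ '.' :: remainder
    else if sep2 && (head == "channel_mixer".toList) && PySem.Chars.startswith tail "m.".toList then
      match pvPartitionDot (tail.drop "m.".toList.length) with
      | (sub, sep3, body) =>
        match (if sep3 then pvChanName stride2 sub else none) with
        | some nm => timm_prefix.toList ++ '.' :: (nm ++ '.' :: body)
        | none => timm_prefix.toList ++ '.' :: remainder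
    else timm_prefix.toList ++ '.' :: remainder

def rename_repvit_suffix_py_alt (suffix : String) (block_mapping : List (Int × String × Bool)) : String :=
  if PySem.Chars.startswith suffix.toList "features.0.0.".toList then
    String.ofList ("stem.conv1.".toList ++ suffix.toList.drop "features.0.0.".toList.length)
  else if PySem.Chars.startswith suffix.toList "features.0.2.".toList then
    String.ofList ("stem.conv2.".toList ++ suffix.toList.drop "features.0.2.".toList.length)
  else if !(PySem.Chars.startswith suffix.toList "features.".toList) then suffix
  else
    match pvPartitionDot (suffix.toList.drop "features.".toList.length) with
    | (tok, sep, remainder) =>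
      if !sep then suffix
      else
        match (pvIndex block_mapping).get? tok with
        | none => suffix
        | some (timm_prefix, stride2) => String.ofList (pvRenameBlock timm_prefix stride2 remainder)

-- ===== PRECONDITION & SPEC =====
def Spec_rename_repvit_suffix_py (suffix : String) (block_mapping : List (Int × String × Bool)) (out : String) : Prop := out = rename_repvit_suffix_py_alt suffix block_mapping
instance (suffix : String) (block_mapping : List (Int × String × Bool)) (out : String) : Decidable (Spec_rename_repvit_suffix_py suffix block_mapping out) := by unfold Spec_rename_repvit_suffix_py; infer_instance

-- ===== CLAIM (what is proved, stated in full; the proofs are below) =====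
def Claim_equal_rename_repvit_suffix_py : Prop := ∀ (suffix : String) (block_mapping : List (Int × String × Bool)), Dom_rename_repvit_suffix_py suffix block_mapping → Spec_rename_repvit_suffix_py suffix block_mapping (rename_repvit_suffix_py suffix block_mapping)

-- ===== LEMMAS AND PROOFS =====

lemma pv_toChars_no_dot (n : Int) : '.' ∉ PySem.Int.toChars n := by
  unfold PySem.Int.toChars
  split
  · intro h
    rcases List.mem_cons.mp h with h1 | h1
    · exact absurd h1 (by decide)
    · exact absurd (Nat.isDigit_of_mem_toDigits (by norm_num) (by norm_num) h1) (by decide)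
  · intro h
    exact absurd (Nat.isDigit_of_mem_toDigits (by norm_num) (by norm_num) h) (by decide)

lemma pv_pd_nodot {u : List Char} (h : '.' ∉ u) : pvPartitionDot u = (u, false, []) := by
  have ht : u.takeWhile (fun c => c != '.') = u := by
    apply List.takeWhile_eq_self_iff.mpr
    intro x hx
    simp only [bne_iff_ne, ne_eq]
    exact fun e => h (e ▸ hx)
  unfold pvPartitionDot
  rw [ht]
  simp

lemma pv_pd_found {t : List Char} (r : List Char) (ht : '.' ∉ t) :
    pvPartitionDot (t ++ '.' :: r) = (t, true, r) := by
  have h1 : (t ++ '.' :: r).takeWhile (fun c => c != '.') = t := by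
    rw [List.takeWhile_append]
    have htt : t.takeWhile (fun c => c != '.') = t := by
      apply List.takeWhile_eq_self_iff.mpr
      intro x hx
      simp only [bne_iff_ne, ne_eq]
      exact fun e => ht (e ▸ hx)
    rw [htt]
    simp
  unfold pvPartitionDot
  rw [h1]
  have hlen : t.length < (t ++ '.' :: r).length := by simp
  rw [if_pos hlen]
  have h2 : t ++ '.' :: r = (t ++ ['.']) ++ r := by simp
  rw [h2, List.drop_left' (by simp)]

lemma pv_pd_cases (u : List Char) : '.' ∉ u ∨ ∃ t r, '.' ∉ t ∧ u = t ++ '.' :: r := by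
  induction u with
  | nil => left; simp
  | cons c u ih =>
    by_cases hc : c = '.'
    · right; exact ⟨[], u, by simp, by simp [hc]⟩
    · rcases ih with h | ⟨t, r, ht, rfl⟩
      · left
        intro hmem
        rcases List.mem_cons.mp hmem with h1 | h1
        · exact hc h1.symm
        · exact h h1
      · right
        refine ⟨c :: t, r, ?_, rfl⟩
        intro hmem
        rcases List.mem_cons.mp hmem with h1 | h1
        · exact hc h1.symm
        · exact ht h1

lemma pv_sw_nil (u : List Char) : PySem.Chars.startswith u [] = true := by
  rw [PySem.Chars.startswith_iff]; exact List.nil_prefix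

lemma pv_sw_false_of_nodot {u p : List Char} (hu : '.' ∉ u) (hp : '.' ∈ p) :
    PySem.Chars.startswith u p = false := by
  apply Bool.eq_false_iff.mpr
  intro hs
  exact hu (((PySem.Chars.startswith_iff u p).mp hs).subset hp)

lemma pv_dot_split_inj : ∀ {t t' r r' : List Char}, '.' ∉ t → '.' ∉ t' →
    t ++ '.' :: r = t' ++ '.' :: r' → t = t' ∧ r = r' := by
  intro t
  induction t with
  | nil =>
    intro t' r r' _ ht' h
    cases t' with
    | nil => simpa using h
    | cons c t'' =>
      simp only [List.nil_append, List.cons_append, List.cons.injEq] at h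
      exact absurd (h.1 ▸ List.mem_cons_self ..) ht'
  | cons c t ih =>
    intro t' r r' ht ht' h
    cases t' with
    | nil =>
      simp only [List.nil_append, List.cons_append, List.cons.injEq] at h
      exact absurd (h.1 ▸ List.mem_cons_self ..) ht
    | cons c' t'' =>
      simp only [List.cons_append, List.cons.injEq] at h
      have ht2 : '.' ∉ t := fun hm => ht (List.mem_cons_of_mem _ hm)
      have ht2' : '.' ∉ t'' := fun hm => ht' (List.mem_cons_of_mem _ hm)
      obtain ⟨he, hr⟩ := ih ht2 ht2' h.2
      exact ⟨by rw [h.1, he], hr⟩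

lemma pv_sw_seg {h : List Char} (tl t b : List Char) (hh : '.' ∉ h) (ht : '.' ∉ t) :
    PySem.Chars.startswith (h ++ '.' :: tl) (t ++ '.' :: b)
      = ((h == t) && PySem.Chars.startswith tl b) := by
  by_cases he : h = t
  · subst he
    have e1 : h ++ '.' :: tl = (h ++ ['.']) ++ tl := by simp
    have e2 : h ++ '.' :: b = (h ++ ['.']) ++ b := by simp
    rw [e1, e2]
    have hc : PySem.Chars.startswith ((h ++ ['.']) ++ tl) ((h ++ ['.']) ++ b)
        = PySem.Chars.startswith tl b := by
      cases hb : PySem.Chars.startswith tl b with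
      | true =>
        rw [PySem.Chars.startswith_iff]
        exact (List.prefix_append_right_inj _).mpr ((PySem.Chars.startswith_iff tl b).mp hb)
      | false =>
        apply Bool.eq_false_iff.mpr
        intro hs
        have := (List.prefix_append_right_inj (h ++ ['.'])).mp
          ((PySem.Chars.startswith_iff _ _).mp hs)
        rw [(PySem.Chars.startswith_iff tl b).mpr this] at hb
        exact Bool.true_eq_false.mp hb
    rw [hc, beq_self_eq_true, Bool.true_and]
  · have hbeq : (h == t) = false := beq_eq_false_iff_ne.mpr he
    rw [hbeq, Bool.false_and]
    apply Bool.eq_false_iff.mpr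
    intro hs
    obtain ⟨s, hs'⟩ := (PySem.Chars.startswith_iff _ _).mp hs
    rw [List.append_assoc, List.cons_append] at hs'
    exact he ((pv_dot_split_inj ht hh hs').1).symm

lemma pv_get?_foldl_setdefault :
    ∀ (bm : List (Int × String × Bool)) (d : PySem.Dict (List Char) (String × Bool)) (k : List Char),
    (bm.foldl (fun d e => d.setdefault (PySem.Int.toChars e.1) (e.2.1, e.2.2)) d).get? k
      = (d.get? k).or ((bm.find? (fun e => PySem.Int.toChars e.1 == k)).map (fun e => (e.2.1, e.2.2))) := by
  intro bm
  induction bm with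
  | nil => intro d k; simp
  | cons e bm ih =>
    intro d k
    rw [List.foldl_cons, ih]
    by_cases hk : PySem.Int.toChars e.1 = k
    · rw [List.find?_cons_of_pos (by simp [hk])]
      subst hk
      rw [PySem.Dict.get?_setdefault_self]
      cases hd : d.get? (PySem.Int.toChars e.1) <;> simp
    · rw [List.find?_cons_of_neg (by simp [hk]),
        PySem.Dict.get?_setdefault_of_ne d (e.2.1, e.2.2)
          (fun (he : k = PySem.Int.toChars e.1) => hk he.symm)]

lemma pv_get?_pvIndex (bm : List (Int × String × Bool)) (k : List Char) :
    (pvIndex bm).get? k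
      = (bm.find? (fun e => PySem.Int.toChars e.1 == k)).map (fun e => (e.2.1, e.2.2)) := by
  unfold pvIndex
  rw [pv_get?_foldl_setdefault]
  simp

lemma pv_aloop_nomatch : ∀ (bm : List (Int × String × Bool)) (cs : List Char),
    (∀ e ∈ bm, PySem.Chars.startswith cs ("features.".toList ++ PySem.Int.toChars e.1 ++ ['.']) = false) →
    pvALoop cs bm = cs := by
  intro bm
  induction bm with
  | nil => intro cs _; rfl
  | cons e bm ih =>
    intro cs h
    obtain ⟨idx, pfx, s2⟩ := e
    show (if PySem.Chars.startswith cs ("features.".toList ++ PySem.Int.toChars idx ++ ['.']) then _ else pvALoop cs bm) = cs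
    rw [if_neg (by rw [h ⟨idx, pfx, s2⟩ (List.mem_cons_self ..)]; simp)]
    exact ih cs (fun e' he' => h e' (List.mem_cons_of_mem _ he'))

lemma pv_aloop_match (tok rest : List Char) (htok : '.' ∉ tok) : ∀ (bm : List (Int × String × Bool)),
    pvALoop ("features.".toList ++ (tok ++ '.' :: rest)) bm =
      match (bm.find? (fun e => PySem.Int.toChars e.1 == tok)).map (fun e => (e.2.1, e.2.2)) with
      | none => "features.".toList ++ (tok ++ '.' :: rest)
      | some (pfx, s2) =>
        if s2 then pvApplyRules pfx.toList pvStride2Rules rest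
        else pvApplyRules pfx.toList pvRegularRules rest := by
  intro bm
  induction bm with
  | nil => simp [pvALoop]
  | cons e bm ih =>
    obtain ⟨idx, pfx, s2⟩ := e
    show (if PySem.Chars.startswith _ ("features.".toList ++ PySem.Int.toChars idx ++ ['.']) then _ else pvALoop _ bm) = _
    by_cases hk : PySem.Int.toChars idx = tok
    · have hfeat : "features.".toList ++ (tok ++ '.' :: rest)
          = ("features.".toList ++ PySem.Int.toChars idx ++ ['.']) ++ rest := by
        rw [hk]; simp
      rw [if_pos ((PySem.Chars.startswith_iff _ _).mpr ⟨rest, hfeat.symm⟩)]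
      rw [List.find?_cons_of_pos (by simp [hk])]
      simp only [Option.map_some]
      rw [hfeat, List.drop_left]
    · have hsw : PySem.Chars.startswith ("features.".toList ++ (tok ++ '.' :: rest))
          ("features.".toList ++ PySem.Int.toChars idx ++ ['.']) = false := by
        apply Bool.eq_false_iff.mpr
        intro hs
        obtain ⟨s, hs'⟩ := (PySem.Chars.startswith_iff _ _).mp hs
        simp only [List.append_assoc, List.singleton_append] at hs'
        have := List.append_cancel_left hs'
        exact hk (pv_dot_split_inj (pv_toChars_no_dot idx) htok this).1
      rw [if_neg (by rw [hsw]; simp), ih, List.find?_cons_of_neg (by simp [hk])]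

lemma pv_rules_eq (pfx : String) (s2 : Bool) (rem : List Char) :
    (if s2 then pvApplyRules pfx.toList pvStride2Rules rem
     else pvApplyRules pfx.toList pvRegularRules rem) = pvRenameBlock pfx s2 rem := by
  have htm : ('.' : Char) ∉ "token_mixer".toList := by decide
  have hcm : ('.' : Char) ∉ "channel_mixer".toList := by decide
  have e1 : ("token_mixer.0.".toList : List Char) = "token_mixer".toList ++ '.' :: "0.".toList := by decide
  have e2 : ("token_mixer.2.".toList : List Char) = "token_mixer".toList ++ '.' :: "2.".toList := by decide
  have e3 : ("token_mixer.1.".toList : List Char) = "token_mixer".toList ++ '.' :: "1.".toList := by decide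
  have e4 : ("channel_mixer.m.0.".toList : List Char) = "channel_mixer".toList ++ '.' :: "m.0.".toList := by decide
  have e5 : ("channel_mixer.m.2.".toList : List Char) = "channel_mixer".toList ++ '.' :: "m.2.".toList := by decide
  rcases pv_pd_cases rem with hnd | ⟨h, tl, hh, rfl⟩
  · -- no '.' in rem: every rule misses, Source B's parse finds no separator
    have c1 : PySem.Chars.startswith rem "token_mixer.0.".toList = false :=
      pv_sw_false_of_nodot hnd (by decide)
    have c2 : PySem.Chars.startswith rem "token_mixer.2.".toList = false :=
      pv_sw_false_of_nodot hnd (by decide)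
    have c3 : PySem.Chars.startswith rem "token_mixer.1.".toList = false :=
      pv_sw_false_of_nodot hnd (by decide)
    have c4 : PySem.Chars.startswith rem "channel_mixer.m.0.".toList = false :=
      pv_sw_false_of_nodot hnd (by decide)
    have c5 : PySem.Chars.startswith rem "channel_mixer.m.2.".toList = false :=
      pv_sw_false_of_nodot hnd (by decide)
    unfold pvRenameBlock
    rw [pv_pd_nodot hnd]
    cases s2 <;>
      simp only [pvApplyRules, pvStride2Rules, pvRegularRules, c1, c2, c3, c4, c5,
        Bool.false_eq_true, if_false, Bool.false_and, if_true]
  · -- rem = h ++ '.' :: tl with '.' ∉ h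
    have s1 : PySem.Chars.startswith (h ++ '.' :: tl) "token_mixer.0.".toList
        = ((h == "token_mixer".toList) && PySem.Chars.startswith tl "0.".toList) := by
      rw [e1, pv_sw_seg tl _ _ hh htm]
    have s2' : PySem.Chars.startswith (h ++ '.' :: tl) "token_mixer.2.".toList
        = ((h == "token_mixer".toList) && PySem.Chars.startswith tl "2.".toList) := by
      rw [e2, pv_sw_seg tl _ _ hh htm]
    have s3 : PySem.Chars.startswith (h ++ '.' :: tl) "token_mixer.1.".toList
        = ((h == "token_mixer".toList) && PySem.Chars.startswith tl "1.".toList) := by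
      rw [e3, pv_sw_seg tl _ _ hh htm]
    have s4 : PySem.Chars.startswith (h ++ '.' :: tl) "channel_mixer.m.0.".toList
        = ((h == "channel_mixer".toList) && PySem.Chars.startswith tl "m.0.".toList) := by
      rw [e4, pv_sw_seg tl _ _ hh hcm]
    have s5 : PySem.Chars.startswith (h ++ '.' :: tl) "channel_mixer.m.2.".toList
        = ((h == "channel_mixer".toList) && PySem.Chars.startswith tl "m.2.".toList) := by
      rw [e5, pv_sw_seg tl _ _ hh hcm]
    unfold pvRenameBlock
    rw [pv_pd_found tl hh]
    dsimp only
    by_cases hht : h = "token_mixer".toList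
    · subst hht
      have hbc : ("token_mixer".toList == "channel_mixer".toList) = false := by decide
      rcases pv_pd_cases tl with hnd2 | ⟨sub, t2, hsub, rfl⟩
      · have d1 : PySem.Chars.startswith tl "0.".toList = false := pv_sw_false_of_nodot hnd2 (by decide)
        have d2 : PySem.Chars.startswith tl "2.".toList = false := pv_sw_false_of_nodot hnd2 (by decide)
        have d3 : PySem.Chars.startswith tl "1.".toList = false := pv_sw_false_of_nodot hnd2 (by decide)
        rw [pv_pd_nodot hnd2]
        cases s2 <;>
          simp only [pvApplyRules, pvStride2Rules, pvRegularRules, s1, s2', s3, s4, s5,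
            d1, d2, d3, hbc, beq_self_eq_true, Bool.true_and, Bool.and_false, Bool.false_and,
            Bool.and_true, Bool.false_eq_true, if_false, Bool.true_eq_false, if_true]
      · -- tl = sub ++ '.' :: t2
        have f0 : ("0.".toList : List Char) = "0".toList ++ '.' :: ([] : List Char) := by decide
        have f2 : ("2.".toList : List Char) = "2".toList ++ '.' :: ([] : List Char) := by decide
        have f1 : ("1.".toList : List Char) = "1".toList ++ '.' :: ([] : List Char) := by decide
        have g0 : PySem.Chars.startswith (sub ++ '.' :: t2) "0.".toList = (sub == "0".toList) := by
          rw [f0, pv_sw_seg t2 _ _ hsub (by decide), pv_sw_nil, Bool.and_true]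
        have g2 : PySem.Chars.startswith (sub ++ '.' :: t2) "2.".toList = (sub == "2".toList) := by
          rw [f2, pv_sw_seg t2 _ _ hsub (by decide), pv_sw_nil, Bool.and_true]
        have g1 : PySem.Chars.startswith (sub ++ '.' :: t2) "1.".toList = (sub == "1".toList) := by
          rw [f1, pv_sw_seg t2 _ _ hsub (by decide), pv_sw_nil, Bool.and_true]
        rw [pv_pd_found t2 hsub]
        by_cases hs0 : sub = "0".toList
        · subst hs0
          have hrem : "token_mixer".toList ++ '.' :: ("0".toList ++ '.' :: t2)
              = "token_mixer.0.".toList ++ t2 := by simp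
          cases s2 <;>
            · simp only [pvApplyRules, pvStride2Rules, pvRegularRules, s1,
                g0, beq_self_eq_true, Bool.true_and, Bool.and_self, if_true]
              rw [hrem, List.drop_left]
              simp [pvTokName]
        · by_cases hs2 : sub = "2".toList
          · subst hs2
            have hrem : "token_mixer".toList ++ '.' :: ("2".toList ++ '.' :: t2)
                = "token_mixer.2.".toList ++ t2 := by simp
            have hne0 : ("2".toList == "0".toList) = false := by decide
            have hne1 : ("2".toList == "1".toList) = false := by decide
            cases s2
            · simp only [pvApplyRules, pvRegularRules, s1, s3, s4, s5, g0, g1,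
                hne0, hne1, hbc, beq_self_eq_true, Bool.true_and, Bool.and_false,
                Bool.false_and, Bool.false_eq_true, if_false, if_true]
              simp [pvTokName]
            · simp only [pvApplyRules, pvStride2Rules, s1, s2', g0, g2,
                hne0, beq_self_eq_true, Bool.true_and, Bool.and_false, Bool.and_self,
                Bool.false_eq_true, if_false, if_true]
              rw [hrem, List.drop_left]
              simp [pvTokName]
          · by_cases hs1 : sub = "1".toList
            · subst hs1
              have hrem : "token_mixer".toList ++ '.' :: ("1".toList ++ '.' :: t2)
                  = "token_mixer.1.".toList ++ t2 := by simp
              have hne0 : ("1".toList == "0".toList) = false := by decide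
              have hne2 : ("1".toList == "2".toList) = false := by decide
              cases s2
              · simp only [pvApplyRules, pvRegularRules, s1, s3, g0, g1,
                  hne0, beq_self_eq_true, Bool.true_and, Bool.and_false, Bool.and_self,
                  Bool.false_eq_true, if_false, if_true]
                rw [hrem, List.drop_left]
                simp [pvTokName]
              · simp only [pvApplyRules, pvStride2Rules, s1, s2', s4, s5, g0, g2,
                  hne0, hne2, hbc, beq_self_eq_true, Bool.true_and, Bool.and_false,
                  Bool.false_and, Bool.false_eq_true, if_false, if_true]
                simp [pvTokName]
            · have hb0 : (sub == "0".toList) = false := beq_eq_false_iff_ne.mpr hs0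
              have hb2 : (sub == "2".toList) = false := beq_eq_false_iff_ne.mpr hs2
              have hb1 : (sub == "1".toList) = false := beq_eq_false_iff_ne.mpr hs1
              cases s2 <;>
                · simp only [pvApplyRules, pvStride2Rules, pvRegularRules, s1, s2', s3, s4, s5,
                    g0, g1, g2, hb0, hb1, hb2, hbc, beq_self_eq_true, Bool.true_and,
                    Bool.and_false, Bool.false_and, Bool.false_eq_true, if_false, if_true]
                  simp [pvTokName, show ¬sub = ['0'] from hs0,
                    show ¬sub = ['1'] from hs1, show ¬sub = ['2'] from hs2]
    · by_cases hhc : h = "channel_mixer".toList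
      · subst hhc
        have hbt : ("channel_mixer".toList == "token_mixer".toList) = false := by decide
        rcases pv_pd_cases tl with hnd2 | ⟨sub, t2, hsub, rfl⟩
        · have d4 : PySem.Chars.startswith tl "m.0.".toList = false := pv_sw_false_of_nodot hnd2 (by decide)
          have d5 : PySem.Chars.startswith tl "m.2.".toList = false := pv_sw_false_of_nodot hnd2 (by decide)
          have dm : PySem.Chars.startswith tl "m.".toList = false := pv_sw_false_of_nodot hnd2 (by decide)
          cases s2 <;>
            simp only [pvApplyRules, pvStride2Rules, pvRegularRules, s1, s2', s3, s4, s5,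
              d4, d5, dm, hbt, beq_self_eq_true, Bool.true_and, Bool.and_false, Bool.false_and,
              Bool.false_eq_true, if_false, if_true]
        · -- tl = sub ++ '.' :: t2
          have fm0 : ("m.0.".toList : List Char) = "m".toList ++ '.' :: "0.".toList := by decide
          have fm2 : ("m.2.".toList : List Char) = "m".toList ++ '.' :: "2.".toList := by decide
          have fm : ("m.".toList : List Char) = "m".toList ++ '.' :: ([] : List Char) := by decide
          have gm : PySem.Chars.startswith (sub ++ '.' :: t2) "m.".toList = (sub == "m".toList) := by
            rw [fm, pv_sw_seg t2 _ _ hsub (by decide), pv_sw_nil, Bool.and_true]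
          have gm0 : PySem.Chars.startswith (sub ++ '.' :: t2) "m.0.".toList
              = ((sub == "m".toList) && PySem.Chars.startswith t2 "0.".toList) := by
            rw [fm0, pv_sw_seg t2 _ _ hsub (by decide)]
          have gm2 : PySem.Chars.startswith (sub ++ '.' :: t2) "m.2.".toList
              = ((sub == "m".toList) && PySem.Chars.startswith t2 "2.".toList) := by
            rw [fm2, pv_sw_seg t2 _ _ hsub (by decide)]
          by_cases hsm : sub = "m".toList
          · subst hsm
            have hdropm : ("m".toList ++ '.' :: t2).drop ("m.".toList : List Char).length = t2 := by
              rw [show ("m".toList ++ '.' :: t2 : List Char) = "m.".toList ++ t2 by simp,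
                List.drop_left]
            rcases pv_pd_cases t2 with hnd3 | ⟨sub2, t3, hsub2, rfl⟩
            · have d0 : PySem.Chars.startswith t2 "0.".toList = false := pv_sw_false_of_nodot hnd3 (by decide)
              have d2 : PySem.Chars.startswith t2 "2.".toList = false := pv_sw_false_of_nodot hnd3 (by decide)
              cases s2 <;>
                simp only [pvApplyRules, pvStride2Rules, pvRegularRules, s1, s2', s3, s4, s5,
                  gm, gm0, gm2, d0, d2, hbt, hdropm, pv_pd_nodot hnd3,
                  beq_self_eq_true, Bool.true_and, Bool.and_false, Bool.false_and, Bool.and_true,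
                  Bool.and_self, Bool.false_eq_true, if_false, if_true]
            · have f0 : ("0.".toList : List Char) = "0".toList ++ '.' :: ([] : List Char) := by decide
              have f2 : ("2.".toList : List Char) = "2".toList ++ '.' :: ([] : List Char) := by decide
              have g0 : PySem.Chars.startswith (sub2 ++ '.' :: t3) "0.".toList = (sub2 == "0".toList) := by
                rw [f0, pv_sw_seg t3 _ _ hsub2 (by decide), pv_sw_nil, Bool.and_true]
              have g2 : PySem.Chars.startswith (sub2 ++ '.' :: t3) "2.".toList = (sub2 == "2".toList) := by
                rw [f2, pv_sw_seg t3 _ _ hsub2 (by decide), pv_sw_nil, Bool.and_true]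
              have hdropm2 : ("m".toList ++ '.' :: (sub2 ++ '.' :: t3)).drop ("m.".toList : List Char).length
                  = sub2 ++ '.' :: t3 := by
                rw [show ("m".toList ++ '.' :: (sub2 ++ '.' :: t3) : List Char)
                    = "m.".toList ++ (sub2 ++ '.' :: t3) by simp, List.drop_left]
              rw [hdropm2, pv_pd_found t3 hsub2]
              by_cases hs0 : sub2 = "0".toList
              · subst hs0
                have hrem : "channel_mixer".toList ++ '.' :: ("m".toList ++ '.' :: ("0".toList ++ '.' :: t3))
                    = "channel_mixer.m.0.".toList ++ t3 := by simp
                cases s2 <;>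
                  · simp only [pvApplyRules, pvStride2Rules, pvRegularRules, s1, s2', s3, s4,
                      gm, gm0, g0, hbt, beq_self_eq_true, Bool.true_and, Bool.and_false,
                      Bool.false_and, Bool.and_self, Bool.false_eq_true, if_false, if_true]
                    rw [hrem, List.drop_left]
                    simp [pvChanName]
              · by_cases hs2 : sub2 = "2".toList
                · subst hs2
                  have hrem : "channel_mixer".toList ++ '.' :: ("m".toList ++ '.' :: ("2".toList ++ '.' :: t3))
                      = "channel_mixer.m.2.".toList ++ t3 := by simp
                  have hne0 : ("2".toList == "0".toList) = false := by decide
                  cases s2 <;>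
                    · simp only [pvApplyRules, pvStride2Rules, pvRegularRules, s1, s2', s3, s4, s5,
                        gm, gm0, gm2, g0, g2, hne0, hbt, beq_self_eq_true, Bool.true_and,
                        Bool.and_false, Bool.false_and, Bool.and_self, Bool.false_eq_true,
                        if_false, if_true]
                      rw [hrem, List.drop_left]
                      simp [pvChanName]
                · have hb0 : (sub2 == "0".toList) = false := beq_eq_false_iff_ne.mpr hs0
                  have hb2 : (sub2 == "2".toList) = false := beq_eq_false_iff_ne.mpr hs2
                  cases s2 <;>
                    · simp only [pvApplyRules, pvStride2Rules, pvRegularRules, s1, s2', s3, s4, s5,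
                        gm, gm0, gm2, g0, g2, hb0, hb2, hbt, beq_self_eq_true, Bool.true_and,
                        Bool.and_false, Bool.false_and, Bool.false_eq_true, if_false, if_true]
                      simp [pvChanName, show ¬sub2 = ['0'] from hs0,
                        show ¬sub2 = ['2'] from hs2]
          · have hbm : (sub == "m".toList) = false := beq_eq_false_iff_ne.mpr hsm
            cases s2 <;>
              simp only [pvApplyRules, pvStride2Rules, pvRegularRules, s1, s2', s3, s4, s5,
                gm, gm0, gm2, hbm, hbt, beq_self_eq_true, Bool.true_and, Bool.and_false,
                Bool.false_and, Bool.false_eq_true, if_false, if_true]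
      · have hbt : (h == "token_mixer".toList) = false := beq_eq_false_iff_ne.mpr hht
        have hbc : (h == "channel_mixer".toList) = false := beq_eq_false_iff_ne.mpr hhc
        cases s2 <;>
          simp only [pvApplyRules, pvStride2Rules, pvRegularRules, s1, s2', s3, s4, s5,
            hbt, hbc, Bool.false_and, Bool.and_false, Bool.true_and,
            Bool.false_eq_true, if_false, if_true]

-- ===== VERDICT (by name: the statement is the Claim_ definition above) =====
theorem rename_repvit_suffix_py_spec : Claim_equal_rename_repvit_suffix_py := by
  intro suffix bm _
  unfold Spec_rename_repvit_suffix_py rename_repvit_suffix_py rename_repvit_suffix_py_alt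
  cases h1 : PySem.Chars.startswith suffix.toList "features.0.0.".toList with
  | true => rw [if_pos rfl, if_pos rfl]
  | false =>
  simp only [Bool.false_eq_true, if_false]
  cases h2 : PySem.Chars.startswith suffix.toList "features.0.2.".toList with
  | true => rw [if_pos rfl, if_pos rfl]
  | false =>
  simp only [Bool.false_eq_true, if_false]
  cases h3 : PySem.Chars.startswith suffix.toList "features.".toList with
  | false =>
    rw [if_pos (show (!false) = true from rfl)]
    have hno : ∀ e ∈ bm, PySem.Chars.startswith suffix.toList
        ("features.".toList ++ PySem.Int.toChars e.1 ++ ['.']) = false := by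
      intro e _
      apply Bool.eq_false_iff.mpr
      intro hs
      have hpre := (PySem.Chars.startswith_iff _ _).mp hs
      have : ("features.".toList : List Char) <+: suffix.toList :=
        List.IsPrefix.trans (by rw [List.append_assoc]; exact List.prefix_append _ _) hpre
      rw [(PySem.Chars.startswith_iff _ _).mpr this] at h3
      exact Bool.true_eq_false.mp h3
    rw [pv_aloop_nomatch bm _ hno, String.ofList_toList]
  | true =>
    rw [if_neg (by simp)]
    obtain ⟨u, hu⟩ := (PySem.Chars.startswith_iff _ _).mp h3
    have hdrop : suffix.toList.drop ("features.".toList : List Char).length = u := by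
      rw [← hu, List.drop_left]
    rcases pv_pd_cases u with hnd | ⟨tok, rest, htok, rfl⟩
    · have hno : ∀ e ∈ bm, PySem.Chars.startswith suffix.toList
          ("features.".toList ++ PySem.Int.toChars e.1 ++ ['.']) = false := by
        intro e _
        apply Bool.eq_false_iff.mpr
        intro hs
        obtain ⟨s, hs'⟩ := (PySem.Chars.startswith_iff _ _).mp hs
        rw [← hu] at hs'
        simp only [List.append_assoc, List.singleton_append] at hs'
        have hcc := List.append_cancel_left hs'
        exact hnd (hcc ▸ (by simp : ('.' : Char) ∈ PySem.Int.toChars e.1 ++ '.' :: s))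
      rw [pv_aloop_nomatch bm _ hno, hdrop, pv_pd_nodot hnd]
      dsimp only
      rw [if_pos (show (!false) = true from rfl), String.ofList_toList]
    · rw [hdrop, pv_pd_found rest htok]
      dsimp only
      rw [if_neg (by simp)]
      rw [show suffix.toList = "features.".toList ++ (tok ++ '.' :: rest) from hu.symm,
        pv_aloop_match tok rest htok bm, pv_get?_pvIndex]
      cases hf : (bm.find? (fun e => PySem.Int.toChars e.1 == tok)).map (fun e => (e.2.1, e.2.2)) with
      | none =>
        dsimp only
        rw [hu, String.ofList_toList]
      | some v =>
        obtain ⟨pfx, s2⟩ := v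
        dsimp only
        rw [pv_rules_eq]
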